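-- pv_equiv track=rewrite | github.com/vlad-a-c/PlayPalace11 | server/games/senet/state.py | has_blocking_line
-- ===== SOURCE A (Python) =====
-- def opponent_num(player_num: int) -> int:
--     return 3 - player_num
--
-- def has_blocking_line(board: list[int], from_idx: int, to_idx: int, player_num: int) -> bool:
--     """Check if 3+ consecutive opponent pieces block the path between from and to."""
--     opp = opponent_num(player_num)
--     consecutive = 0
--     for i in range(from_idx + 1, to_idx):
--         if board[i] == opp:
--             consecutive += 1
--             if consecutive >= 3:
--                 return True
--         else:
--             consecutive = 0
--     return False
-- ===== SOURCE B (Python) =====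
-- def has_blocking_line(board, from_idx, to_idx, player_num):
--     opp = 3 - player_num
--     return any(board[i] == opp and board[i + 1] == opp and board[i + 2] == opp
--                for i in range(from_idx + 1, to_idx - 2))
-- ===== Notes on version B (the rewrite author's own statement) =====
-- stated objective: idiomatic
-- what changed: The stateful run-counter loop with early return is replaced by a stateless any() over a sliding window of three consecutive indices.
import Mathlib
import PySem

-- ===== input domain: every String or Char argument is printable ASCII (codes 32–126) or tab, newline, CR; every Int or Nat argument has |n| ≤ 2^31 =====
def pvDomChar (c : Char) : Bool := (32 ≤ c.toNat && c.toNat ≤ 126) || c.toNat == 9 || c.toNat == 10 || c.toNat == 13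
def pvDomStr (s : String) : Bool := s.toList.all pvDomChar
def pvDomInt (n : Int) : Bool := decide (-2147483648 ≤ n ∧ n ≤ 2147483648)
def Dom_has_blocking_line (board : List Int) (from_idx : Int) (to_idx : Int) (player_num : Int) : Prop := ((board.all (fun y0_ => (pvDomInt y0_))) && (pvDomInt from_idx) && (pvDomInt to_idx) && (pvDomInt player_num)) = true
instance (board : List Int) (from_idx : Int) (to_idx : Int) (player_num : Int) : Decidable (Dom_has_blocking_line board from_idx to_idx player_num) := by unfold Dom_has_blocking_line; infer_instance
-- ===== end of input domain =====

-- B replaces A's stateful run-counter loop with a stateless any() over sliding 3-windows (idiomatic; same cost).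

-- ===== PORT A =====
def opponent_num (player_num : Int) : Int := 3 - player_num

def has_blocking_line (board : List Int) (from_idx : Int) (to_idx : Int) (player_num : Int) : Bool :=
  let opp := opponent_num player_num
  -- the loop with early return, as a fold carrying (consecutive, found); board[i] via pyGetD (exact under Pre_)
  ((PySem.List.pyRange (from_idx + 1) to_idx 1).foldl
    (fun (st : Int × Bool) i =>
      if st.2 then st
      else if PySem.List.pyGetD board i 0 == opp then
        (st.1 + 1, decide (3 ≤ st.1 + 1))
      else (0, false))
    (0, false)).2

-- ===== PORT B =====
def has_blocking_line_alt (board : List Int) (from_idx : Int) (to_idx : Int) (player_num : Int) : Bool :=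
  let opp := 3 - player_num
  (PySem.List.pyRange (from_idx + 1) (to_idx - 2) 1).any fun i =>
    PySem.List.pyGetD board i 0 == opp && PySem.List.pyGetD board (i + 1) 0 == opp
      && PySem.List.pyGetD board (i + 2) 0 == opp

-- ===== PRECONDITION & SPEC =====
-- Pre_ excludes EXACTLY the inputs on which the Python A raises IndexError: the scanned window is
-- nonempty and either starts below -len(board), or runs past the end without A returning True first
-- (i.e. no run of 3 opponent pieces completes at an index < len(board)); on every input where A
-- returns a value, Pre_ holds.
def Pre_has_blocking_line (board : List Int) (from_idx : Int) (to_idx : Int) (player_num : Int) : Prop :=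
  to_idx ≤ from_idx + 1 ∨
  (-(board.length : Int) ≤ from_idx + 1 ∧
    (to_idx ≤ (board.length : Int) ∨
      ((PySem.List.pyRange (from_idx + 3) (board.length : Int) 1).any fun e =>
        PySem.List.pyGetD board (e - 2) 0 == 3 - player_num &&
        PySem.List.pyGetD board (e - 1) 0 == 3 - player_num &&
        PySem.List.pyGetD board e 0 == 3 - player_num) = true))
instance (board : List Int) (from_idx : Int) (to_idx : Int) (player_num : Int) : Decidable (Pre_has_blocking_line board from_idx to_idx player_num) := by unfold Pre_has_blocking_line; infer_instance

def pvWitness_has_blocking_line : List Int × Int × Int × Int := ([1, 2, 2, 2, 1], -1, 5, 1)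

def Spec_has_blocking_line (board : List Int) (from_idx : Int) (to_idx : Int) (player_num : Int) (out : Bool) : Prop := out = has_blocking_line_alt board from_idx to_idx player_num
instance (board : List Int) (from_idx : Int) (to_idx : Int) (player_num : Int) (out : Bool) : Decidable (Spec_has_blocking_line board from_idx to_idx player_num out) := by unfold Spec_has_blocking_line; infer_instance

-- ===== CLAIM (what is proved, stated in full; the proofs are below) =====
def Claim_equal_has_blocking_line : Prop := ∀ (board : List Int) (from_idx : Int) (to_idx : Int) (player_num : Int), Dom_has_blocking_line board from_idx to_idx player_num → Pre_has_blocking_line board from_idx to_idx player_num → Spec_has_blocking_line board from_idx to_idx player_num (has_blocking_line board from_idx to_idx player_num)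

-- ===== LEMMAS AND PROOFS =====

/-- The loop body of A, on the boolean `board[i] == opp`. -/
def pvStep (st : Int × Bool) (x : Bool) : Int × Bool :=
  if st.2 then st else if x then (st.1 + 1, decide (3 ≤ st.1 + 1)) else (0, false)

/-- Length of the leading run of `true`s. -/
def pvLead : List Bool → Int
  | [] => 0
  | x :: t => if x then pvLead t + 1 else 0

/-- Sliding-window view: some 3 consecutive entries are all `true`. -/
def pvW3 : List Bool → Bool
  | a :: b :: c :: t => (a && b && c) || pvW3 (b :: c :: t)
  | _ => false

theorem pvLead_nonneg (l : List Bool) : 0 ≤ pvLead l := by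
  induction l with
  | nil => simp [pvLead]
  | cons x t ih => by_cases hx : x <;> simp [pvLead, hx] <;> omega

theorem pvW3_of_lead (l : List Bool) (h : 3 ≤ pvLead l) : pvW3 l = true := by
  match l with
  | [] => simp [pvLead] at h
  | [x] => by_cases hx : x <;> simp [pvLead, hx] at h
  | [x, y] => by_cases hx : x <;> by_cases hy : y <;> simp [pvLead, hx, hy] at h
  | a :: b :: c :: t =>
    have ha : a = true := by
      by_contra hc
      simp only [Bool.not_eq_true] at hc
      subst hc; simp [pvLead] at h
    subst ha
    have hb : b = true := by
      by_contra hc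
      simp only [Bool.not_eq_true] at hc
      subst hc; simp [pvLead] at h
    subst hb
    have hcc : c = true := by
      by_contra hc
      simp only [Bool.not_eq_true] at hc
      subst hc; simp [pvLead] at h
    subst hcc
    simp [pvW3]

theorem pvW3_false_cons (t : List Bool) : pvW3 (false :: t) = pvW3 t := by
  match t with
  | [] => rfl
  | [a] => rfl
  | a :: b :: r => simp [pvW3]

theorem pvW3_true_cons (t : List Bool) :
    pvW3 (true :: t) = (decide (2 ≤ pvLead t) || pvW3 t) := by
  match t with
  | [] =>
    simp [pvW3, pvLead]
  | [a] =>
    by_cases ha : a <;> simp [pvW3, pvLead, ha]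
  | a :: b :: r =>
    by_cases ha : a <;> by_cases hb : b
    · have := pvLead_nonneg r
      simp [pvW3, pvLead, ha, hb]
      omega
    · simp [pvW3, pvLead, ha, hb]
    · simp [pvW3, pvLead, ha, hb]
    · simp [pvW3, pvLead, ha, hb]

theorem pvStep_sticky (l : List Bool) (c : Int) :
    (l.foldl pvStep (c, true)).2 = true := by
  induction l generalizing c with
  | nil => rfl
  | cons x t ih => simpa [pvStep] using ih c

theorem pvFold_eq (l : List Bool) : ∀ c : Int, 0 ≤ c → c ≤ 2 →
    (l.foldl pvStep (c, false)).2 = (decide (3 ≤ c + pvLead l) || pvW3 l) := by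
  induction l with
  | nil => intro c h0 h2; simp [pvLead, pvW3]; omega
  | cons x t ih =>
    intro c h0 h2
    by_cases hx : x
    · subst hx
      by_cases hc : c = 2
      · subst hc
        have h1 : pvStep (2, false) true = (3, true) := by simp [pvStep]
        rw [List.foldl_cons, h1, pvStep_sticky]
        have := pvLead_nonneg t
        simp [pvLead]; omega
      · have h1 : pvStep (c, false) true = (c + 1, false) := by
          simp [pvStep]; omega
        rw [List.foldl_cons, h1, ih (c + 1) (by omega) (by omega),
          pvW3_true_cons]
        by_cases h2' : 2 ≤ pvLead t
        · have hg : 3 ≤ c + 1 + pvLead t := by omega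
          have hg' : 3 ≤ c + pvLead (true :: t) := by simp [pvLead]; omega
          simp [hg, hg']
        · have he : (3 ≤ c + 1 + pvLead t) ↔ (3 ≤ c + pvLead (true :: t)) := by
            simp [pvLead]; omega
          simp only [h2', decide_false, Bool.false_or]
          by_cases hg : 3 ≤ c + 1 + pvLead t
          · simp [hg, he.mp hg]
          · have hg' : ¬ 3 ≤ c + pvLead (true :: t) := fun h => hg (he.mpr h)
            simp [hg, hg']
    · simp only [Bool.not_eq_true] at hx; subst hx
      have h1 : pvStep (c, false) false = (0, false) := by simp [pvStep]
      rw [List.foldl_cons, h1, ih 0 (by omega) (by omega), pvW3_false_cons]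
      have hl : ¬ (3 ≤ c + pvLead (false :: t)) := by simp [pvLead]; omega
      by_cases h3 : 3 ≤ pvLead t
      · simp [hl, pvW3_of_lead t h3]
      · simp [hl, h3]

theorem pvAbsorb (l : List Bool) :
    (decide (3 ≤ pvLead l) || pvW3 l) = pvW3 l := by
  by_cases h : 3 ≤ pvLead l
  · simp [h, pvW3_of_lead l h]
  · simp [h]

theorem pvW3_short (l : List Bool) (h : l.length ≤ 2) : pvW3 l = false := by
  match l with
  | [] => rfl
  | [a] => rfl
  | [a, b] => rfl
  | a :: b :: c :: t => simp at h

theorem pvW3_windows (β : Int → Bool) (b : Int) :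
    ∀ (n : Nat) (a : Int), (b - a).toNat = n →
    pvW3 ((PySem.List.pyRange a b 1).map β)
      = (PySem.List.pyRange a (b - 2) 1).any fun i => β i && β (i + 1) && β (i + 2) := by
  intro n
  induction n with
  | zero =>
    intro a hn
    have hb : b ≤ a := by omega
    rw [PySem.List.pyRange_one_eq_nil hb, PySem.List.pyRange_one_eq_nil (by omega)]
    rfl
  | succ n ih =>
    intro a hn
    by_cases hab : a + 2 < b
    · have e1 : PySem.List.pyRange a b 1 = a :: PySem.List.pyRange (a + 1) b 1 :=
        PySem.List.pyRange_one_cons (by omega)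
      have e2 : PySem.List.pyRange (a + 1) b 1
          = (a + 1) :: PySem.List.pyRange (a + 1 + 1) b 1 :=
        PySem.List.pyRange_one_cons (by omega)
      have e3 : PySem.List.pyRange (a + 1 + 1) b 1
          = (a + 2) :: PySem.List.pyRange (a + 2 + 1) b 1 := by
        rw [show a + 1 + 1 = a + 2 by ring]
        exact PySem.List.pyRange_one_cons (by omega)
      have e4 : PySem.List.pyRange a (b - 2) 1
          = a :: PySem.List.pyRange (a + 1) (b - 2) 1 :=
        PySem.List.pyRange_one_cons (by omega)
      rw [e1, e2, e3, List.map_cons, List.map_cons, List.map_cons]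
      rw [show pvW3 (β a :: β (a + 1) :: β (a + 2)
            :: (PySem.List.pyRange (a + 2 + 1) b 1).map β)
          = ((β a && β (a + 1) && β (a + 2))
            || pvW3 (β (a + 1) :: β (a + 2)
                :: (PySem.List.pyRange (a + 2 + 1) b 1).map β)) from rfl]
      rw [show (β (a + 1) :: β (a + 2) :: (PySem.List.pyRange (a + 2 + 1) b 1).map β)
          = (PySem.List.pyRange (a + 1) b 1).map β by
        rw [e2, e3, List.map_cons, List.map_cons]]
      rw [ih (a + 1) (by omega), e4, List.any_cons]
    · have h2 : b - 2 ≤ a := by omega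
      rw [PySem.List.pyRange_one_eq_nil h2]
      rw [pvW3_short _ (by
        rw [List.length_map, PySem.List.length_pyRange_one]; omega)]
      rfl

theorem has_blocking_line_as_fold (board : List Int) (from_idx to_idx player_num : Int) :
    has_blocking_line board from_idx to_idx player_num
      = (((PySem.List.pyRange (from_idx + 1) to_idx 1).map
            (fun i => PySem.List.pyGetD board i 0 == 3 - player_num)).foldl
          pvStep (0, false)).2 := by
  rw [List.foldl_map]
  rfl

theorem pv_main (board : List Int) (from_idx to_idx player_num : Int) :
    has_blocking_line board from_idx to_idx player_num
      = has_blocking_line_alt board from_idx to_idx player_num := by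
  rw [has_blocking_line_as_fold board from_idx to_idx player_num,
    pvFold_eq _ 0 le_rfl (by omega)]
  simp only [zero_add]
  rw [pvAbsorb,
    pvW3_windows (fun i => PySem.List.pyGetD board i 0 == 3 - player_num) to_idx
      (to_idx - (from_idx + 1)).toNat (from_idx + 1) rfl]
  rfl

-- ===== VERDICT (by name: the statement is the Claim_ definition above) =====
theorem has_blocking_line_spec : Claim_equal_has_blocking_line := by
  intro board from_idx to_idx player_num _ _
  exact pv_main board from_idx to_idx player_num
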